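-- pv_equiv track=rewrite | github.com/LC1332/Chat-Haruhi-Suzumiya | ChatHaruhi2.0/make_roleLLM_data.py | extract_tuples_from_story
-- ===== SOURCE A (Python) =====
-- def extract_tuples_from_story(role_name, chunks):
--     story_tuples = []
--     for chunk in chunks:
--         role_list = chunk["role_list"]
--         text_list = chunk["text_list"]
--
--         query, target = "", ""
--         history = []
--         for role, text in zip(role_list, text_list):
--             if role == role_name and query != "":
--                 target = text
--                 story_tuples.append((query, target, history[:-1]))
--             else:
--                 query = text
--
--             history.append(text)
--
--     return story_tuples
-- ===== SOURCE B (Python) =====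
-- def extract_tuples_from_story(role_name, chunks):
--     out = []
--     for chunk in chunks:
--         texts = chunk["text_list"]
--         pairs = list(zip(chunk["role_list"], texts))
--         # stage 1: materialise the snapshot of the running query before each step
--         qs = []
--         q = ""
--         for role, text in pairs:
--             qs.append(q)
--             if not (role == role_name and q != ""):
--                 q = text
--         # stage 2: select the hit positions declaratively, slicing the input list
--         out.extend((q0, text, texts[:i - 1])
--                    for i, (q0, (role, text)) in enumerate(zip(qs, pairs))
--                    if role == role_name and q0 != "")
--     return out
-- ===== Notes on version B (the rewrite author's own statement) =====
-- stated objective: alternative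
-- what changed: Replaces A's single interleaved scan (emitting tuples while mutating query/target/history) by a two-stage pipeline: stage 1 materialises the list qs of query snapshots, stage 2 declaratively filters enumerate(zip(qs, pairs)) and slices the input text_list (texts[:i-1] = A's history[:-1]); no history or target accumulator exists.
import Mathlib
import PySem

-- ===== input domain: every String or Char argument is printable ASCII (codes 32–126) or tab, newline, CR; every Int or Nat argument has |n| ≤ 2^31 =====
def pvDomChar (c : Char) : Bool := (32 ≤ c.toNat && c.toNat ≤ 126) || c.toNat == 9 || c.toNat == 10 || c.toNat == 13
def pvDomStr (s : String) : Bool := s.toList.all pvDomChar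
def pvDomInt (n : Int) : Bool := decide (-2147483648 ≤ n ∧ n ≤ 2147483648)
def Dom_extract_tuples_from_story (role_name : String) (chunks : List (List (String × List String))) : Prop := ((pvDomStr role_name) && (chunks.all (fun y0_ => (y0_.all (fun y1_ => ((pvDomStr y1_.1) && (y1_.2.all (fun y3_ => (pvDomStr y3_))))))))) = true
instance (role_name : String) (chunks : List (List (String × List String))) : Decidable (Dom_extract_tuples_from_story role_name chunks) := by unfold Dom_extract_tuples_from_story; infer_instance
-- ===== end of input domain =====

-- B replaces A's interleaved emit-while-scanning loop by two stages: a scan that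
-- materialises the list of query snapshots, then a declarative filter over
-- enumerate(zip(qs, pairs)) that slices the input text list; objective: alternative.

-- ===== PORT A =====
-- inner-loop body of A: state = (story_tuples, query, target, history)
def pvStepA (role_name : String)
    (st : List (String × String × List String) × String × String × List String)
    (rt : String × String) : List (String × String × List String) × String × String × List String :=
  let story := st.1; let query := st.2.1; let history := st.2.2.2
  if rt.1 = role_name ∧ query ≠ "" then
    -- history[:-1] ported as PySem.List.slice … (some (-1)) (exact)
    (story ++ [(query, rt.2, PySem.List.slice history none (some (-1)))], query, rt.2, history ++ [rt.2])
  else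
    (story, rt.2, st.2.2.1, history ++ [rt.2])

-- body of A's outer loop over chunks (threads story_tuples through)
def pvChunkA (role_name : String) (story : List (String × String × List String))
    (chunk : List (String × List String)) : List (String × String × List String) :=
  let role_list := (PySem.Dict.mk chunk).getD "role_list" []
  let text_list := (PySem.Dict.mk chunk).getD "text_list" []
  ((role_list.zip text_list).foldl (pvStepA role_name) (story, "", "", [])).1

def extract_tuples_from_story (role_name : String) (chunks : List (List (String × List String))) : List (String × String × List String) :=
  chunks.foldl (pvChunkA role_name) []

-- ===== PORT B =====
-- stage-1 body: state = (qs, q); appends the snapshot, then updates q as Source B does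
def pvStage1 (role_name : String) (st : List String × String) (rt : String × String) : List String × String :=
  (st.1 ++ [st.2], if ¬(rt.1 = role_name ∧ st.2 ≠ "") then rt.2 else st.2)

-- per-chunk body of B: stage 1 builds qs, stage 2 filters enumerate(zip(qs, pairs))
-- (Python's zip(qs, pairs) of a list of pairs → nested pair (q0, (role, text)))
def pvChunkB (role_name : String) (chunk : List (String × List String)) : List (String × String × List String) :=
  let texts := (PySem.Dict.mk chunk).getD "text_list" []
  let pairs := ((PySem.Dict.mk chunk).getD "role_list" []).zip texts
  let qs := (pairs.foldl (pvStage1 role_name) ([], "")).1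
  ((PySem.List.enumerate (qs.zip pairs) 0).filter
      (fun p => p.2.2.1 == role_name && p.2.1 != "")).map
    (fun p => (p.2.1, p.2.2.2, PySem.List.slice texts none (some (p.1 - 1))))

def extract_tuples_from_story_alt (role_name : String) (chunks : List (List (String × List String))) : List (String × String × List String) :=
  chunks.foldl (fun out chunk => out ++ pvChunkB role_name chunk) []

-- ===== PRECONDITION & SPEC =====
-- A raises KeyError on a chunk missing the key "role_list" or "text_list"; Pre_ excludes exactly those.
def Pre_extract_tuples_from_story (role_name : String) (chunks : List (List (String × List String))) : Prop :=
  ∀ chunk ∈ chunks, ((PySem.Dict.mk chunk).contains "role_list" ∧ (PySem.Dict.mk chunk).contains "text_list")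
instance (role_name : String) (chunks : List (List (String × List String))) : Decidable (Pre_extract_tuples_from_story role_name chunks) := by unfold Pre_extract_tuples_from_story; infer_instance

def pvWitness_extract_tuples_from_story : String × (List (List (String × List String))) :=
  ("a", [[("role_list", ["b", "a"]), ("text_list", ["hi", "yo"])]])

def Spec_extract_tuples_from_story (role_name : String) (chunks : List (List (String × List String))) (out : List (String × String × List String)) : Prop := out = extract_tuples_from_story_alt role_name chunks
instance (role_name : String) (chunks : List (List (String × List String))) (out : List (String × String × List String)) : Decidable (Spec_extract_tuples_from_story role_name chunks out) := by unfold Spec_extract_tuples_from_story; infer_instance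

-- ===== CLAIM (what is proved, stated in full; the proofs are below) =====
def Claim_equal_extract_tuples_from_story : Prop := ∀ (role_name : String) (chunks : List (List (String × List String))), Dom_extract_tuples_from_story role_name chunks → Pre_extract_tuples_from_story role_name chunks → Spec_extract_tuples_from_story role_name chunks (extract_tuples_from_story role_name chunks)

-- ===== LEMMAS AND PROOFS =====

-- common reference recursion: the tuples emitted from position k onward with running query q
def pvGo (role_name : String) (texts : List String) :
    List (String × String) → Nat → String → List (String × String × List String)
  | [], _, _ => []
  | z :: rest, k, q =>
    if z.1 = role_name ∧ q ≠ "" then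
      (q, z.2, PySem.List.slice texts none (some ((k : Int) - 1))) :: pvGo role_name texts rest (k + 1) q
    else
      pvGo role_name texts rest (k + 1) z.2

-- the query snapshots produced from running query q
def pvQs (role_name : String) : List (String × String) → String → List String
  | [], _ => []
  | z :: rest, q => q :: pvQs role_name rest (if ¬(z.1 = role_name ∧ q ≠ "") then z.2 else q)

theorem stage1_eq (role_name : String) (zs : List (String × String)) (acc : List String) (q : String) :
    (zs.foldl (pvStage1 role_name) (acc, q)).1 = acc ++ pvQs role_name zs q := by
  induction zs generalizing acc q with
  | nil => simp [pvQs]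
  | cons z zs ih => simp [pvStage1, pvQs, ih, List.append_assoc]

theorem stage2_eq (role_name : String) (texts : List String)
    (zs : List (String × String)) (q : String) (k : Nat) :
    ((PySem.List.enumerate ((pvQs role_name zs q).zip zs) (k : Int)).filter
        (fun p => p.2.2.1 == role_name && p.2.1 != "")).map
      (fun p => (p.2.1, p.2.2.2, PySem.List.slice texts none (some (p.1 - 1))))
      = pvGo role_name texts zs k q := by
  induction zs generalizing q k with
  | nil => simp [pvQs, pvGo, PySem.List.enumerate_nil]
  | cons z zs ih =>
    have hcast : ((k : Int) + 1) = ((k + 1 : Nat) : Int) := by push_cast; ring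
    rw [pvQs, List.zip_cons_cons, PySem.List.enumerate_cons, hcast]
    by_cases hc : z.1 = role_name ∧ q ≠ ""
    · have hb : ((z.1 == role_name && q != "") = true) := by
        simp [hc.1, hc.2]
      rw [pvGo, if_pos hc, ← ih q (k + 1)]
      simp [hb, if_neg (show ¬(z.1 = role_name → q = "") from fun h => hc.2 (h hc.1))]
    · have hb : ((z.1 == role_name && q != "") = false) := by
        rcases not_and_or.mp hc with h | h
        · simp [h]
        · simp [not_not.mp h]
      rw [pvGo, if_neg hc, ← ih z.2 (k + 1)]
      have hi : z.1 = role_name → q = "" := fun h => by_contra (fun hq => hc ⟨h, hq⟩)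
      rw [if_pos hc]
      simp [hb]

theorem zip_map_snd {α β : Type} (xs : List α) (ys : List β) :
    (xs.zip ys).map Prod.snd = ys.take (xs.zip ys).length := by
  induction xs generalizing ys with
  | nil => simp
  | cons x xs ih =>
    cases ys with
    | nil => simp
    | cons y ys => simp [ih]

-- Main invariant for A: its inner fold with history = texts.take k equals pvGo from k.
theorem inner_eq (role_name : String) (texts : List String)
    (zs : List (String × String)) (k : Nat)
    (story : List (String × String × List String)) (query target : String)
    (hz : zs.map Prod.snd = (texts.drop k).take zs.length)
    (hq : k = 0 → query = "") :
    (zs.foldl (pvStepA role_name) (story, query, target, texts.take k)).1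
      = story ++ pvGo role_name texts zs k query := by
  induction zs generalizing k story query target with
  | nil => simp [pvGo]
  | cons z zs ih =>
    have hlt : k < texts.length := by
      by_contra h
      have : texts.drop k = [] := List.drop_eq_nil_of_le (by omega)
      simp [this] at hz
    have hdrop : texts.drop k = texts[k] :: texts.drop (k + 1) :=
      List.drop_eq_getElem_cons hlt
    rw [hdrop, List.length_cons, List.take_succ_cons, List.map_cons] at hz
    have hhead : z.2 = texts[k] := (List.cons.injEq _ _ _ _).mp hz |>.1
    have htail : zs.map Prod.snd = (texts.drop (k + 1)).take zs.length :=
      (List.cons.injEq _ _ _ _).mp hz |>.2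
    have htake : texts.take k ++ [z.2] = texts.take (k + 1) := by
      rw [hhead, List.take_add_one, List.getElem?_eq_getElem hlt]; rfl
    rw [List.foldl_cons]
    by_cases hc : z.1 = role_name ∧ query ≠ ""
    · have hk : 1 ≤ k := by
        rcases Nat.eq_zero_or_pos k with h0 | h1
        · exact absurd (hq h0) hc.2
        · exact h1
      have hslice : PySem.List.slice (texts.take k) none (some (-1))
          = PySem.List.slice texts none (some ((k : Int) - 1)) := by
        have he : ((k : Int) - 1) = ((k - 1 : Nat) : Int) := by omega
        rw [he, PySem.List.slice_to_natCast, PySem.List.slice_to_neg_one, List.dropLast_take]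
        congr 1
      simp only [pvStepA, if_pos hc]
      rw [htake, ih (k + 1) _ query z.2 htail (by omega), pvGo, if_pos hc, hslice]
      simp [List.append_assoc]
    · simp only [pvStepA, if_neg hc]
      rw [htake, ih (k + 1) _ z.2 target htail (by omega), pvGo, if_neg hc]

theorem chunk_eq (role_name : String) (story : List (String × String × List String))
    (chunk : List (String × List String)) :
    pvChunkA role_name story chunk = story ++ pvChunkB role_name chunk := by
  unfold pvChunkA pvChunkB
  dsimp only
  set roles := (PySem.Dict.mk chunk).getD "role_list" [] with hr
  set texts := (PySem.Dict.mk chunk).getD "text_list" [] with ht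
  have hA := inner_eq role_name texts (roles.zip texts) 0 story "" ""
      (by simpa using zip_map_snd roles texts) (fun _ => rfl)
  simp only [List.take_zero] at hA
  rw [hA, stage1_eq, List.nil_append]
  have hB := stage2_eq role_name texts (roles.zip texts) "" 0
  simp only [Nat.cast_zero] at hB
  rw [hB]

theorem folds_eq (role_name : String) (chunks : List (List (String × List String)))
    (acc : List (String × String × List String)) :
    chunks.foldl (pvChunkA role_name) acc
      = chunks.foldl (fun out chunk => out ++ pvChunkB role_name chunk) acc := by
  induction chunks generalizing acc with
  | nil => rfl
  | cons c cs ih => rw [List.foldl_cons, List.foldl_cons, chunk_eq, ih]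

-- ===== VERDICT (by name: the statement is the Claim_ definition above) =====
theorem extract_tuples_from_story_spec : Claim_equal_extract_tuples_from_story := by
  intro role_name chunks _ _
  unfold Spec_extract_tuples_from_story extract_tuples_from_story extract_tuples_from_story_alt
  exact folds_eq role_name chunks []
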